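-- pv_equiv track=rewrite | github.com/santoshkosgi/Programming | Leetcode/54.py | get_spiral_of_matrix
-- ===== SOURCE A (Python) =====
-- def get_spiral_of_matrix(matrix, start_row, start_column, end_column, end_row):
--     """
--     This function accepts a matrix and pther required fields and finds the spiral
--     ordering of the matrix.
--     """
--     spiral_order = []
--
--     for column in range(start_column, end_column + 1):
--         spiral_order.append(matrix[start_row][column])
--
--     for row in range(start_row + 1, end_row + 1):
--         spiral_order.append(matrix[row][end_column])
--
--     if end_row != start_row:
--         for column in reversed(range(start_column, end_column)):
--             spiral_order.append(matrix[end_row][column])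
--
--     if start_column != end_column:
--         for row in reversed(range(start_row + 1, end_row)):
--             spiral_order.append(matrix[row][start_column])
--
--     return spiral_order
-- ===== SOURCE B (Python) =====
-- def get_spiral_of_matrix(matrix, start_row, start_column, end_column, end_row):
--     """Directional-walk simulation: step cell by cell, turning clockwise at the
--     layer boundary, emitting exactly the number of perimeter cells."""
--     height = end_row - start_row + 1
--     width = end_column - start_column + 1
--     if height == 1:
--         total = width
--     elif width == 1:
--         total = height
--     else:
--         total = 2 * (height + width) - 4
--     top, bottom, left, right = start_row, end_row, start_column, end_column
--     r, c = start_row, start_column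
--     dr, dc = 0, 1
--     out = []
--     for _ in range(total):
--         out.append(matrix[r][c])
--         nr, nc = r + dr, c + dc
--         if nr < top or nr > bottom or nc < left or nc > right:
--             if dr == 0 and dc == 1:
--                 top += 1
--                 dr, dc = 1, 0
--             elif dr == 1:
--                 right -= 1
--                 dr, dc = 0, -1
--             elif dc == -1:
--                 bottom -= 1
--                 dr, dc = -1, 0
--             else:
--                 left += 1
--                 dr, dc = 0, 1
--         r += dr
--         c += dc
--     return out
-- ===== Notes on version B (the rewrite author's own statement) =====
-- stated objective: alternative
-- what changed: Replaces A's four separate boundary loops (top row, right column, reversed bottom row, reversed left column, with two guard conditions) by a single clockwise directional-walk simulation that steps one cell at a time, turning and shrinking the boundary when the next step would leave it, emitting exactly the precomputed number of perimeter cells.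
-- outside the precondition, e.g. on get_spiral_of_matrix([[1, 2], [3, 4]], 0, 1, 0, 1): A returns [3], B returns []; on get_spiral_of_matrix([[1, 2], [3, 4]], 1, 0, 1, 0): A returns [3, 4, 1], B returns []
import Mathlib
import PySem

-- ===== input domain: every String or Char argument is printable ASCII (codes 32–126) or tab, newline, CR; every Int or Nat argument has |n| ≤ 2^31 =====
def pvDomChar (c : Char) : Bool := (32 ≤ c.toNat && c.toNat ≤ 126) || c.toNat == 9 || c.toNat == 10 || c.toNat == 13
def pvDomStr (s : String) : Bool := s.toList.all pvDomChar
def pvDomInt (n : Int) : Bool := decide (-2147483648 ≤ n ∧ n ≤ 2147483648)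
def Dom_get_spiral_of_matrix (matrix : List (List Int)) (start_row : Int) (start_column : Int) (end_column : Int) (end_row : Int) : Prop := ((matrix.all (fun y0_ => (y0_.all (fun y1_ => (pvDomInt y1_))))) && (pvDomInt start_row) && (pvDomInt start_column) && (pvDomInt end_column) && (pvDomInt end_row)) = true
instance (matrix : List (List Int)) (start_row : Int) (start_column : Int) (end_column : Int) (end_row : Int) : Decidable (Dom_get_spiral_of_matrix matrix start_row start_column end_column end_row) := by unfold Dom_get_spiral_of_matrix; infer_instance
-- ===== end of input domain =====

-- B replaces A's four hand-written boundary loops by a single clockwise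
-- directional-walk simulation (alternative algorithm, same cost); return value
-- equivalence is proved on the natural layer domain (start ≤ end on both axes,
-- all accessed cells Python-index-valid).

-- matrix[r][c] (Python indexing, negative indices from the end); shared shorthand for both ports
def pvCell (matrix : List (List Int)) (r c : Int) : Int :=
  PySem.List.pyGetD (PySem.List.pyGetD matrix r []) c 0

-- ===== PORT A =====
def get_spiral_of_matrix (matrix : List (List Int)) (start_row : Int) (start_column : Int) (end_column : Int) (end_row : Int) : List Int :=
  let spiral_order : List Int := []
  let spiral_order :=
    (PySem.List.pyRange start_column (end_column + 1) 1).foldl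
      (fun acc column => acc ++ [pvCell matrix start_row column]) spiral_order
  let spiral_order :=
    (PySem.List.pyRange (start_row + 1) (end_row + 1) 1).foldl
      (fun acc row => acc ++ [pvCell matrix row end_column]) spiral_order
  let spiral_order :=
    if end_row ≠ start_row then
      ((PySem.List.pyRange start_column end_column 1).reverse).foldl
        (fun acc column => acc ++ [pvCell matrix end_row column]) spiral_order
    else spiral_order
  let spiral_order :=
    if start_column ≠ end_column then
      ((PySem.List.pyRange (start_row + 1) end_row 1).reverse).foldl
        (fun acc row => acc ++ [pvCell matrix row start_column]) spiral_order
    else spiral_order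
  spiral_order

-- ===== PORT B =====
-- the walk loop of Source B: state (r, c, dr, dc, top, bottom, left, right, out), one fuel unit per emitted cell
def spiralWalk (matrix : List (List Int)) :
    Nat → Int → Int → Int → Int → Int → Int → Int → Int → List Int → List Int
  | 0, _, _, _, _, _, _, _, _, acc => acc
  | n + 1, r, c, dr, dc, top, bottom, left, right, acc =>
    let acc' := acc ++ [pvCell matrix r c]
    let nr := r + dr
    let nc := c + dc
    if nr < top ∨ nr > bottom ∨ nc < left ∨ nc > right then
      if dr = 0 ∧ dc = 1 then
        spiralWalk matrix n (r + 1) c 1 0 (top + 1) bottom left right acc'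
      else if dr = 1 then
        spiralWalk matrix n r (c - 1) 0 (-1) top bottom left (right - 1) acc'
      else if dc = -1 then
        spiralWalk matrix n (r - 1) c (-1) 0 top (bottom - 1) left right acc'
      else
        spiralWalk matrix n r (c + 1) 0 1 top bottom (left + 1) right acc'
    else
      spiralWalk matrix n nr nc dr dc top bottom left right acc'

def get_spiral_of_matrix_alt (matrix : List (List Int)) (start_row : Int) (start_column : Int) (end_column : Int) (end_row : Int) : List Int :=
  let height := end_row - start_row + 1
  let width := end_column - start_column + 1
  let total : Int :=
    if height = 1 then width
    else if width = 1 then height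
    else 2 * (height + width) - 4
  spiralWalk matrix total.toNat start_row start_column 0 1 start_row end_row start_column end_column []

-- ===== PRECONDITION & SPEC =====
-- Pre_ admits the natural layer domain (start ≤ end on both axes, every accessed cell
-- Python-index-valid) and the degenerate case end_row ≤ start_row ∧ end_column < start_column,
-- where neither program touches the matrix and both return [].  It excludes the remaining
-- inverted-bounds inputs, on which A still returns an accidental partial strip; those are
-- outside the spiral driver's natural domain and B naturally returns [] there.
def Pre_get_spiral_of_matrix (matrix : List (List Int)) (start_row : Int) (start_column : Int) (end_column : Int) (end_row : Int) : Prop :=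
  (start_row ≤ end_row ∧ start_column ≤ end_column ∧
    -(matrix.length : Int) ≤ start_row ∧ end_row < (matrix.length : Int) ∧
    ∀ r ∈ PySem.List.pyRange start_row (end_row + 1) 1,
      PySem.Raise.InRange matrix.length r ∧
      PySem.Raise.InRange (PySem.List.pyGetD matrix r []).length start_column ∧
      PySem.Raise.InRange (PySem.List.pyGetD matrix r []).length end_column) ∨
  (end_row ≤ start_row ∧ end_column < start_column)
instance (matrix : List (List Int)) (start_row : Int) (start_column : Int) (end_column : Int) (end_row : Int) : Decidable (Pre_get_spiral_of_matrix matrix start_row start_column end_column end_row) := by unfold Pre_get_spiral_of_matrix; infer_instance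

def pvWitness_get_spiral_of_matrix : List (List Int) × Int × Int × Int × Int :=
  ([[1, 2, 3], [4, 5, 6], [7, 8, 9]], 0, 0, 2, 2)

def Spec_get_spiral_of_matrix (matrix : List (List Int)) (start_row : Int) (start_column : Int) (end_column : Int) (end_row : Int) (out : List Int) : Prop := out = get_spiral_of_matrix_alt matrix start_row start_column end_column end_row
instance (matrix : List (List Int)) (start_row : Int) (start_column : Int) (end_column : Int) (end_row : Int) (out : List Int) : Decidable (Spec_get_spiral_of_matrix matrix start_row start_column end_column end_row out) := by unfold Spec_get_spiral_of_matrix; infer_instance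

-- ===== CLAIM (what is proved, stated in full; the proofs are below) =====
def Claim_equal_get_spiral_of_matrix : Prop := ∀ (matrix : List (List Int)) (start_row : Int) (start_column : Int) (end_column : Int) (end_row : Int), Dom_get_spiral_of_matrix matrix start_row start_column end_column end_row → Pre_get_spiral_of_matrix matrix start_row start_column end_column end_row → Spec_get_spiral_of_matrix matrix start_row start_column end_column end_row (get_spiral_of_matrix matrix start_row start_column end_column end_row)

-- ===== LEMMAS AND PROOFS =====

-- A unfolded to four mapped segments
lemma A_segments (m : List (List Int)) (sr sc ec er : Int) :
    get_spiral_of_matrix m sr sc ec er =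
      ((PySem.List.pyRange sc (ec + 1) 1).map (fun c => pvCell m sr c) ++
       (PySem.List.pyRange (sr + 1) (er + 1) 1).map (fun r => pvCell m r ec)) ++
      ((if er ≠ sr then ((PySem.List.pyRange sc ec 1).reverse).map (fun c => pvCell m er c) else []) ++
       (if sc ≠ ec then ((PySem.List.pyRange (sr + 1) er 1).reverse).map (fun r => pvCell m r sc) else [])) := by
  simp only [get_spiral_of_matrix, PySem.List.foldl_append_singleton_eq_map]
  split_ifs <;> simp [List.append_assoc]

-- Phase 1: moving right along row r = top from column c to `right`, then turning down
lemma walk_right (m : List (List Int)) (k : Nat) :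
    ∀ (n : Nat) (r c top bottom left right : Int) (acc : List Int),
      r = top → top ≤ bottom → left ≤ c → c + k = right →
      spiralWalk m (k + 1 + n) r c 0 1 top bottom left right acc =
        spiralWalk m n (r + 1) right 1 0 (top + 1) bottom left right
          (acc ++ (PySem.List.pyRange c (right + 1) 1).map (fun j => pvCell m r j)) := by
  induction k with
  | zero =>
    intro n r c top bottom left right acc hr htb hlc hk
    have hc : c = right := by omega
    subst hc hr
    rw [show 0 + 1 + n = n + 1 from by omega]
    simp only [spiralWalk]
    rw [if_pos (by omega : (r + 0 < r ∨ r + 0 > bottom ∨ c + 1 < left ∨ c + 1 > c))]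
    simp [PySem.List.pyRange_one_singleton]
  | succ k ih =>
    intro n r c top bottom left right acc hr htb hlc hk
    have hstep : ¬ (r + 0 < top ∨ r + 0 > bottom ∨ c + 1 < left ∨ c + 1 > right) := by omega
    rw [show k + 1 + 1 + n = (k + 1 + n) + 1 from by omega]
    simp only [spiralWalk]
    rw [if_neg hstep]
    simp only [add_zero]
    rw [ih n r (c + 1) top bottom left right _ hr htb (by omega) (by omega)]
    rw [PySem.List.pyRange_one_cons (by omega : c < right + 1)]
    simp [List.append_assoc]

-- Phase 2: moving down along column `right` to row `bottom`, then turning left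
lemma walk_down (m : List (List Int)) (k : Nat) :
    ∀ (n : Nat) (r top bottom left right : Int) (acc : List Int),
      left ≤ right → top ≤ r + 1 → r + k = bottom →
      spiralWalk m (k + 1 + n) r right 1 0 top bottom left right acc =
        spiralWalk m n bottom (right - 1) 0 (-1) top bottom left (right - 1)
          (acc ++ (PySem.List.pyRange r (bottom + 1) 1).map (fun i => pvCell m i right)) := by
  induction k with
  | zero =>
    intro n r top bottom left right acc hlr htr hk
    have hr : r = bottom := by omega
    subst hr
    rw [show 0 + 1 + n = n + 1 from by omega]
    simp only [spiralWalk]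
    rw [if_pos (by omega : (r + 1 < top ∨ r + 1 > r ∨ right + 0 < left ∨ right + 0 > right))]
    simp [PySem.List.pyRange_one_singleton]
  | succ k ih =>
    intro n r top bottom left right acc hlr htr hk
    have hstep : ¬ (r + 1 < top ∨ r + 1 > bottom ∨ right + 0 < left ∨ right + 0 > right) := by omega
    rw [show k + 1 + 1 + n = (k + 1 + n) + 1 from by omega]
    simp only [spiralWalk]
    rw [if_neg hstep]
    simp only [add_zero]
    rw [ih n (r + 1) top bottom left right _ hlr (by omega) (by omega)]
    rw [PySem.List.pyRange_one_cons (by omega : r < bottom + 1)]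
    simp [List.append_assoc]

-- Phase 3: moving left along row `bottom` from column c down to `left`, then turning up
lemma walk_left (m : List (List Int)) (k : Nat) :
    ∀ (n : Nat) (c top bottom left right : Int) (acc : List Int),
      top ≤ bottom → c ≤ right → c - k = left →
      spiralWalk m (k + 1 + n) bottom c 0 (-1) top bottom left right acc =
        spiralWalk m n (bottom - 1) left (-1) 0 top (bottom - 1) left right
          (acc ++ (PySem.List.pyRange c (left - 1) (-1)).map (fun j => pvCell m bottom j)) := by
  induction k with
  | zero =>
    intro n c top bottom left right acc htb hcr hk
    have hc : c = left := by omega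
    subst hc
    rw [show 0 + 1 + n = n + 1 from by omega]
    simp only [spiralWalk]
    rw [if_pos (by omega : (bottom + 0 < top ∨ bottom + 0 > bottom ∨ c + -1 < c ∨ c + -1 > right))]
    simp [PySem.List.pyRange_neg_one_cons (by omega : c - 1 < c),
      PySem.List.pyRange_neg_one_eq_nil (le_refl (c - 1))]
  | succ k ih =>
    intro n c top bottom left right acc htb hcr hk
    have hstep : ¬ (bottom + 0 < top ∨ bottom + 0 > bottom ∨ c + -1 < left ∨ c + -1 > right) := by omega
    rw [show k + 1 + 1 + n = (k + 1 + n) + 1 from by omega]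
    simp only [spiralWalk]
    rw [if_neg hstep]
    simp only [add_zero]
    rw [show c + -1 = c - 1 from by omega]
    rw [ih n (c - 1) top bottom left right _ htb (by omega) (by omega)]
    rw [PySem.List.pyRange_neg_one_cons (by omega : left - 1 < c)]
    simp [List.append_assoc]

-- Phase 4: moving up along column `left` from row r down to `top`; fuel runs out exactly at `top`
lemma walk_up (m : List (List Int)) (k : Nat) :
    ∀ (r top bottom left right : Int) (acc : List Int),
      r ≤ bottom → left ≤ right → r - k = top →
      spiralWalk m (k + 1) r left (-1) 0 top bottom left right acc =
        acc ++ (PySem.List.pyRange r (top - 1) (-1)).map (fun i => pvCell m i left) := by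
  induction k with
  | zero =>
    intro r top bottom left right acc hrb hlr hk
    have hr : r = top := by omega
    subst hr
    have h1 : spiralWalk m (0 + 1) r left (-1) 0 r bottom left right acc =
        acc ++ [pvCell m r left] := by
      simp only [spiralWalk]
      split_ifs <;> rfl
    rw [h1, PySem.List.pyRange_neg_one_cons (by omega : r - 1 < r),
      PySem.List.pyRange_neg_one_eq_nil (by omega : r - 1 ≤ r - 1)]
    simp
  | succ k ih =>
    intro r top bottom left right acc hrb hlr hk
    have hstep : ¬ (r + -1 < top ∨ r + -1 > bottom ∨ left + 0 < left ∨ left + 0 > right) := by omega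
    conv_lhs => rw [show k + 1 + 1 = (k + 1) + 1 from rfl, spiralWalk]
    rw [if_neg hstep]
    rw [show r + -1 = r - 1 from by omega, show left + 0 = left from by omega]
    rw [ih (r - 1) top bottom left right _ (by omega) hlr (by omega)]
    rw [PySem.List.pyRange_neg_one_cons (by omega : top - 1 < r)]
    simp [List.append_assoc]

-- countdown segments are A's reversed ranges
lemma neg_range_rev (a b : Int) (f : Int → Int) :
    (PySem.List.pyRange (a - 1) (b - 1) (-1)).map f =
      ((PySem.List.pyRange b a 1).map f).reverse := by
  rw [PySem.List.pyRange_neg_one_eq_reverse]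
  simp

theorem equal_core (m : List (List Int)) (sr sc ec er : Int)
    (hre : sr ≤ er) (hce : sc ≤ ec) :
    get_spiral_of_matrix m sr sc ec er = get_spiral_of_matrix_alt m sr sc ec er := by
  have hB : get_spiral_of_matrix_alt m sr sc ec er =
      spiralWalk m (if er - sr + 1 = 1 then ec - sc + 1
        else if ec - sc + 1 = 1 then er - sr + 1
        else 2 * ((er - sr + 1) + (ec - sc + 1)) - 4).toNat sr sc 0 1 sr er sc ec [] := rfl
  rw [A_segments, hB]
  by_cases h1 : er - sr + 1 = 1
  · -- single row
    rw [if_pos h1]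
    rw [show (ec - sc + 1).toNat = (ec - sc).toNat + 1 + 0 from by omega]
    rw [walk_right m (ec - sc).toNat 0 sr sc sr er sc ec [] rfl hre (le_refl sc) (by omega)]
    have her : er = sr := by omega
    subst her
    simp [spiralWalk, PySem.List.pyRange_one_eq_nil (by omega : er + 1 ≤ er + 1)]
  · rw [if_neg h1]
    by_cases h2 : ec - sc + 1 = 1
    · -- single column, at least two rows
      rw [if_pos h2]
      have hec : ec = sc := by omega
      rw [show (er - sr + 1).toNat = 0 + 1 + (er - sr).toNat from by omega]
      rw [walk_right m 0 (er - sr).toNat sr sc sr er sc ec [] rfl hre (le_refl sc) (by omega)]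
      rw [show (er - sr).toNat = (er - sr - 1).toNat + 1 + 0 from by omega]
      rw [walk_down m (er - sr - 1).toNat 0 (sr + 1) (sr + 1) er sc ec _ hce (by omega) (by omega)]
      rw [if_pos (by omega : er ≠ sr), if_neg (by omega : ¬ sc ≠ ec)]
      simp [spiralWalk, PySem.List.pyRange_one_eq_nil (by omega : ec ≤ sc)]
    · -- general layer: height ≥ 2 and width ≥ 2
      rw [if_neg h2]
      have hh : sr + 1 ≤ er := by omega
      have hw : sc + 1 ≤ ec := by omega
      rw [show (2 * ((er - sr + 1) + (ec - sc + 1)) - 4).toNat =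
            (ec - sc).toNat + 1 + ((er - sr) + (er - sr) + (ec - sc) - 1).toNat from by omega]
      rw [walk_right m (ec - sc).toNat _ sr sc sr er sc ec [] rfl hre (le_refl sc) (by omega)]
      rw [show ((er - sr) + (er - sr) + (ec - sc) - 1).toNat =
            (er - sr - 1).toNat + 1 + ((er - sr) + (ec - sc) - 1).toNat from by omega]
      rw [walk_down m (er - sr - 1).toNat _ (sr + 1) (sr + 1) er sc ec _ hce (by omega) (by omega)]
      rw [show ((er - sr) + (ec - sc) - 1).toNat =
            (ec - sc - 1).toNat + 1 + (er - sr - 1).toNat from by omega]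
      rw [walk_left m (ec - sc - 1).toNat _ (ec - 1) (sr + 1) er sc (ec - 1) _ (by omega) (by omega) (by omega)]
      rw [if_pos (by omega : er ≠ sr), if_pos (by omega : sc ≠ ec)]
      by_cases h3 : er - sr = 1
      · -- exactly two rows: no up phase, and A's left segment is empty
        rw [show (er - sr - 1).toNat = 0 from by omega]
        rw [show PySem.List.pyRange (sr + 1) er 1 = [] from
          PySem.List.pyRange_one_eq_nil (by omega)]
        rw [show PySem.List.pyRange ((ec : Int) - 1) (sc - 1) (-1) =
              PySem.List.pyRange ((ec - 1 + 1 : Int) - 1) ((sc - 1 + 1 : Int) - 1) (-1) from by norm_num]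
        rw [neg_range_rev (ec - 1 + 1) (sc - 1 + 1)]
        simp [spiralWalk, List.append_assoc]
      · -- at least three rows: up phase
        rw [show (er - sr - 1).toNat = (er - sr - 2).toNat + 1 from by omega]
        rw [walk_up m (er - sr - 2).toNat (er - 1) (sr + 1) (er - 1) sc (ec - 1) _ (by omega) (by omega) (by omega)]
        rw [show PySem.List.pyRange ((ec : Int) - 1) (sc - 1) (-1) =
              PySem.List.pyRange ((ec - 1 + 1 : Int) - 1) ((sc - 1 + 1 : Int) - 1) (-1) from by norm_num]
        rw [neg_range_rev (ec - 1 + 1) (sc - 1 + 1)]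
        rw [show PySem.List.pyRange ((er : Int) - 1) (sr + 1 - 1) (-1) =
              PySem.List.pyRange ((er - 1 + 1 : Int) - 1) ((sr + 1 : Int) - 1) (-1) from by norm_num]
        rw [neg_range_rev (er - 1 + 1) (sr + 1)]
        simp [List.append_assoc]

-- both programs return [] when the bounds are inverted on both axes (no cell is in the layer)
theorem equal_empty (m : List (List Int)) (sr sc ec er : Int)
    (hre : er ≤ sr) (hce : ec < sc) :
    get_spiral_of_matrix m sr sc ec er = get_spiral_of_matrix_alt m sr sc ec er := by
  have hB : get_spiral_of_matrix_alt m sr sc ec er =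
      spiralWalk m (if er - sr + 1 = 1 then ec - sc + 1
        else if ec - sc + 1 = 1 then er - sr + 1
        else 2 * ((er - sr + 1) + (ec - sc + 1)) - 4).toNat sr sc 0 1 sr er sc ec [] := rfl
  rw [A_segments, hB,
    show (if er - sr + 1 = 1 then ec - sc + 1
      else if ec - sc + 1 = 1 then er - sr + 1
      else 2 * ((er - sr + 1) + (ec - sc + 1)) - 4).toNat = 0 from by split_ifs <;> omega]
  rw [PySem.List.pyRange_one_eq_nil (by omega : ec + 1 ≤ sc),
    PySem.List.pyRange_one_eq_nil (by omega : er + 1 ≤ sr + 1),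
    PySem.List.pyRange_one_eq_nil (by omega : ec ≤ sc),
    PySem.List.pyRange_one_eq_nil (by omega : er ≤ sr + 1)]
  simp [spiralWalk]

-- ===== VERDICT (by name: the statement is the Claim_ definition above) =====
theorem get_spiral_of_matrix_spec : Claim_equal_get_spiral_of_matrix := by
  intro matrix sr sc ec er _ hpre
  unfold Spec_get_spiral_of_matrix
  rcases hpre with h | h
  · exact equal_core matrix sr sc ec er h.1 h.2.1
  · exact equal_empty matrix sr sc ec er h.1 h.2
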